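-- pv_equiv track=rewrite | github.com/bqi1/BlackWatchmen | MissionBot/commands/intros/331-as-6/a5p1.py | freqDict
-- ===== SOURCE A (Python) =====
-- ETAION = "ETAOINSHRDLCUMWFGYPBVKJXQZ"
--
-- LETTERS = "ABCDEFGHIJKLMNOPQRSTUVWXYZ"
--
-- def freqDict(ciphertext: str) -> dict:
--
--     """
--     Analyze the frequency of the letters
--     """
--     occurence_mapping = {}
--     # First map letters to how many times they appear in the ciphertext. For example, "AAAA" will have "A":4 in the occurence_mapping
--     for letter in LETTERS:
--         occurence_mapping[letter] = 0
--     for letter in ciphertext: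
--         if letter.upper() in LETTERS:
--             if letter.upper() not in occurence_mapping.keys():
--                 occurence_mapping[letter.upper()] = 1
--             else:
--                 occurence_mapping[letter.upper()] += 1
--
--     # Now map letters to their plaintext given by frequency in ETAION. If two or more letters have the same value, order them occording to when they first appeared
--     letter_mapping = {} # Maps letters to most frequent plaintext in ETAION
--     index = 0
--     # Iterate through all letters in ETAION until we have went through all occurences
--     while True:
--         if len(occurence_mapping) == 0 or index >= len(ETAION):
--             break
--         # Get the highest occuring letter in the occurence_mapping in a list
--         max_occurence = max(occurence_mapping.values())
--         letters = [key for key,value in occurence_mapping.items() if value == max_occurence]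
--
--         if len(letters) > 1: # If there are more than two letters with the same amount of occurences:
--             ordering = resolve_tie(letters, ciphertext) # Retrieve a list of the proper ordering
--             # For each ordered letter, assign it to the very next letter in ETAION. Delete the letter from the occurence_mapping to know we have passed over it.
--             for ordered_letter in ordering:
--                 letter_mapping[ordered_letter] = ETAION[index]
--                 del occurence_mapping[ordered_letter]
--                 index+=1
--         else: # There is only one letter with a certain amount of maximum occurences
--             letter_mapping[letters[0]] = ETAION[index]
--             del occurence_mapping[letters[0]] # Remove the letter from occurence_mapping to know we passed it
--             index+=1
--
--     letter_mapping[" "] = " "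
--     return letter_mapping
--
-- def resolve_tie(letters: list, ciphertext: str) -> list:
--     """
--     Given two or more letters in a list, resolve the ordering by analyzing the first occurences of each letter
--     """
--     first_occurences = {} # Map letters to the very first index they appear in ciphertext. For example, if ciphertext is "ABCDABCD," then "B" would map to 1
--     ordering = [] # Return list of ordered letters
--     for letter in letters:
--         first_occurences[letter] = ciphertext.upper().find(letter)
--     while True: # Exhaust dictionary of first_occurences. Delete entries to know we evaluated them
--         if len(first_occurences) == 0: break
--         min_index = min(first_occurences.values()) # Find the first occuring index. The letter will be appended first to ordering.
--         leftmost_key = [key for key,value in first_occurences.items() if value == min_index][0] # Find the letter corresponding to the first occuring index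
--         ordering.append(leftmost_key)
--         del first_occurences[leftmost_key]
--
--     return ordering
-- ===== SOURCE B (Python) =====
-- LETTERS = "ABCDEFGHIJKLMNOPQRSTUVWXYZ"
--
-- ETAION = "ETAOINSHRDLCUMWFGYPBVKJXQZ"
--
-- def freqDict(ciphertext: str) -> dict:
--     """Rank the letters by frequency with one stable sort instead of repeated max/min extraction."""
--     up = ciphertext.upper()
--     order = sorted(LETTERS, key=lambda c: (-up.count(c), up.find(c)))
--     letter_mapping = {c: p for c, p in zip(order, ETAION)}
--     letter_mapping[" "] = " "
--     return letter_mapping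
-- ===== Notes on version B (the rewrite author's own statement) =====
-- stated objective: simpler
-- what changed: Replaces the two nested selection loops (repeated max-extraction over an occurrence dict plus a resolve_tie helper that repeatedly extracts the min first-occurrence) by a single stable sort of the alphabet on the composite key (-count, first occurrence), relying on sort stability for the alphabetical tie-break.
import Mathlib
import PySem

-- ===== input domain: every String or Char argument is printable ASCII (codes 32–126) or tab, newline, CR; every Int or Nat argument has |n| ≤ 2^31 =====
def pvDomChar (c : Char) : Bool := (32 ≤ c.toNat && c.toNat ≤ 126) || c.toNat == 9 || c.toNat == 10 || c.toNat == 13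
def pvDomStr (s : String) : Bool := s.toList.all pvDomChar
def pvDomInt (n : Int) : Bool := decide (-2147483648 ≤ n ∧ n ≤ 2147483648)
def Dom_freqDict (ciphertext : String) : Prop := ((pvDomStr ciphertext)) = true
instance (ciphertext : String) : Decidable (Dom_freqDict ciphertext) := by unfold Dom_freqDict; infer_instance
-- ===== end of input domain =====

-- B replaces A's repeated max-extraction (plus resolve_tie's repeated min-extraction) by one
-- stable sort of the alphabet on the composite key (-count, first occurrence); same return value.

-- ===== PORT A =====
def pvLETTERS : String := "ABCDEFGHIJKLMNOPQRSTUVWXYZ"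
def pvETAION : String := "ETAOINSHRDLCUMWFGYPBVKJXQZ"

-- port of resolve_tie's while loop; fuel = size of first_occurences (the loop runs exactly that often)
def pvResolveTieLoop (fuel : Nat) (fo : PySem.Dict String Int) (ordering : List String) : List String :=
  match fuel with
  | 0 => ordering
  | fuel + 1 =>
    if fo.items.length = 0 then ordering
    else
      match PySem.List.min? fo.values (fun v => v) with
      | none => ordering  -- unreachable (dict nonempty)
      | some minIdx =>
        match PySem.List.pyGet? ((fo.items.filter (fun kv => kv.2 == minIdx)).map (fun kv => kv.1)) 0 with
        | none => ordering -- unreachable ([0] on a nonempty list)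
        | some leftmost =>
          pvResolveTieLoop fuel (fo.erase leftmost) (ordering ++ [leftmost])

def pvResolveTie (letters : List String) (ciphertext : String) : List String :=
  let fo : PySem.Dict String Int :=
    letters.foldl (fun d l => d.insert l (PySem.Str.find (PySem.Str.upper ciphertext) l)) PySem.Dict.empty
  pvResolveTieLoop fo.items.length fo []

-- port of freqDict's while loop; fuel = size of occurence_mapping (each pass deletes at least one key)
def pvFreqLoop (fuel : Nat) (om : PySem.Dict String Int) (lm : PySem.Dict String String)
    (index : Int) (ciphertext : String) : PySem.Dict String String :=
  match fuel with
  | 0 => lm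
  | fuel + 1 =>
    if om.items.length = 0 ∨ index ≥ PySem.Str.len pvETAION then lm
    else
      match PySem.List.max? om.values (fun v => v) with
      | none => lm  -- unreachable (dict nonempty)
      | some maxOcc =>
        let letters := (om.items.filter (fun kv => kv.2 == maxOcc)).map (fun kv => kv.1)
        if letters.length > 1 then
          let st := (pvResolveTie letters ciphertext).foldl
            (fun (s : PySem.Dict String String × PySem.Dict String Int × Int) ol =>
              match PySem.Str.pyGet? pvETAION s.2.2 with
              | none => s  -- unreachable (index stays below 26)
              | some p => (s.1.insert ol (String.ofList [p]), s.2.1.erase ol, s.2.2 + 1))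
            (lm, om, index)
          pvFreqLoop fuel st.2.1 st.1 st.2.2 ciphertext
        else
          match PySem.List.pyGet? letters 0 with
          | none => lm  -- unreachable (letters nonempty)
          | some l0 =>
            match PySem.Str.pyGet? pvETAION index with
            | none => lm  -- unreachable (index < 26 here)
            | some p =>
              pvFreqLoop fuel (om.erase l0) (lm.insert l0 (String.ofList [p])) (index + 1) ciphertext

def freqDict (ciphertext : String) : List (String × String) :=
  let om0 : PySem.Dict String Int :=
    pvLETTERS.toList.foldl (fun d letter => d.insert (String.ofList [letter]) 0) PySem.Dict.empty
  let om : PySem.Dict String Int :=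
    ciphertext.toList.foldl (fun d letter =>
      let u := PySem.Str.upper (String.ofList [letter])
      if PySem.Str.isIn u pvLETTERS then
        if !(d.contains u) then d.insert u 1 else d.insert u ((d.get? u).getD 0 + 1)
      else d) om0
  let lm := pvFreqLoop om.items.length om PySem.Dict.empty 0 ciphertext
  (lm.insert " " " ").items

-- ===== PORT B =====
def freqDict_alt (ciphertext : String) : List (String × String) :=
  let up := PySem.Str.upper ciphertext
  let order := PySem.List.sorted2 pvLETTERS.toList
      (fun c => -(PySem.Str.count up (String.ofList [c]) : Int))
      (fun c => PySem.Str.find up (String.ofList [c]))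
  (order.zip pvETAION.toList).map (fun p => (String.ofList [p.1], String.ofList [p.2])) ++ [(" ", " ")]

-- ===== PRECONDITION & SPEC =====
def Spec_freqDict (ciphertext : String) (out : List (String × String)) : Prop := out = freqDict_alt ciphertext
instance (ciphertext : String) (out : List (String × String)) : Decidable (Spec_freqDict ciphertext out) := by unfold Spec_freqDict; infer_instance

-- ===== CLAIM (what is proved, stated in full; the proofs are below) =====
def Claim_equal_freqDict : Prop := ∀ (ciphertext : String), Dom_freqDict ciphertext → Spec_freqDict ciphertext (freqDict ciphertext)

-- ===== LEMMAS AND PROOFS =====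

-- proof-side abbreviations
def pvStr (c : Char) : String := String.ofList [c]
def pvUp (ct : String) : List Char := PySem.Chars.upper ct.toList
def pvCnt (up : List Char) (c : Char) : Int := (up.count c : Int)
def pvFnd (up : List Char) (c : Char) : Int := PySem.Chars.find up [c]
-- the composite sort key: more frequent first, then earlier first occurrence, then alphabetical
def pvKey (up : List Char) (c : Char) : Lex (Int × Lex (Int × Int)) :=
  toLex (-(pvCnt up c), toLex (pvFnd up c, (c.toNat : Int)))
-- the occurrence dict restricted to the still-unprocessed letters sub
def pvDictOf (up : List Char) (sub : List Char) : PySem.Dict String Int :=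
  ⟨sub.map (fun c => (pvStr c, pvCnt up c))⟩
-- tie order produced by resolve_tie
def pvOrd2 (up : List Char) (a b : Char) : Prop :=
  pvFnd up a < pvFnd up b ∨ (pvFnd up a = pvFnd up b ∧ (a.toNat : Int) < (b.toNat : Int))

lemma pvStr_inj {a b : Char} (h : pvStr a = pvStr b) : a = b := by
  have := congrArg String.toList h
  simpa [pvStr] using this

lemma pvStr_beq (a b : Char) : (pvStr a == pvStr b) = (a == b) := by
  by_cases h : a = b
  · simp [h]
  · have h2 : pvStr a ≠ pvStr b := fun hc => h (pvStr_inj hc)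
    rw [beq_eq_false_iff_ne.mpr h2, beq_eq_false_iff_ne.mpr h]

lemma pvCharLt {a b : Char} (h : a < b) : (a.toNat : Int) < (b.toNat : Int) := by
  have h2 : a.toNat < b.toNat := h
  exact_mod_cast h2

lemma pvKey_lt_iff (up : List Char) (a b : Char) :
    pvKey up a < pvKey up b ↔
      (-(pvCnt up a) < -(pvCnt up b) ∨
        (pvCnt up a = pvCnt up b ∧
          (pvFnd up a < pvFnd up b ∨ (pvFnd up a = pvFnd up b ∧ (a.toNat : Int) < (b.toNat : Int))))) := by
  unfold pvKey
  rw [Prod.Lex.lt_iff]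
  constructor
  · rintro (h1 | ⟨he, h2⟩)
    · exact Or.inl h1
    · exact Or.inr ⟨neg_inj.mp he, Prod.Lex.lt_iff.mp h2⟩
  · rintro (h1 | ⟨he, h2⟩)
    · exact Or.inl h1
    · exact Or.inr ⟨by simp [he], Prod.Lex.lt_iff.mpr h2⟩

lemma pvKey_inj (up : List Char) {a b : Char} (h : pvKey up a = pvKey up b) : a = b := by
  unfold pvKey at h
  have h1 := congrArg (fun x => (ofLex x).2) h
  have h2 := congrArg (fun x => (ofLex x).2) h1
  simp only [ofLex_toLex] at h1 h2
  have h3 : (a.toNat : Int) = (b.toNat : Int) := h2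
  exact Char.ext (UInt32.toNat_inj.mp (Int.ofNat_inj.mp h3))

-- ===== generic list lemmas =====
lemma pvInsertBy_congr {α : Type} (b1 b2 : α → α → Bool) (x : α) :
    ∀ acc : List α, (∀ y ∈ acc, b1 x y = b2 x y) →
      PySem.List.insertBy b1 x acc = PySem.List.insertBy b2 x acc := by
  intro acc
  induction acc with
  | nil => intro _; rfl
  | cons y ys ih =>
    intro h
    simp only [PySem.List.insertBy]
    rw [h y (by simp)]
    by_cases hb : b2 x y = true
    · simp [hb]
    · simp only [Bool.not_eq_true] at hb
      simp [hb, ih (fun z hz => h z (by simp [hz]))]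

lemma pvFoldl_insertBy_congr {α : Type} (b1 b2 : α → α → Bool) :
    ∀ (xs acc : List α),
      (∀ x ∈ xs, ∀ y ∈ acc, b1 x y = b2 x y) →
      xs.Pairwise (fun a b => b1 b a = b2 b a) →
      xs.foldl (fun acc x => PySem.List.insertBy b1 x acc) acc
        = xs.foldl (fun acc x => PySem.List.insertBy b2 x acc) acc := by
  intro xs
  induction xs with
  | nil => intro acc _ _; rfl
  | cons x rest ih =>
    intro acc hacc hpw
    have hx : PySem.List.insertBy b1 x acc = PySem.List.insertBy b2 x acc :=
      pvInsertBy_congr b1 b2 x acc (hacc x (by simp))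
    simp only [List.foldl_cons, hx]
    apply ih
    · intro z hz y hy
      rcases (PySem.List.mem_insertBy b2 x y acc).mp hy with rfl | hy'
      · exact (List.pairwise_cons.mp hpw).1 z hz
      · exact hacc z (by simp [hz]) y hy'
    · exact (List.pairwise_cons.mp hpw).2

lemma pvZip_append_split {α β : Type} :
    ∀ (xs xs' : List α) (l : List β),
      (xs ++ xs').zip l = xs.zip l ++ xs'.zip (l.drop xs.length) := by
  intro xs
  induction xs with
  | nil => intro xs' l; simp
  | cons x rest ih =>
    intro xs' l
    cases l with
    | nil => simp
    | cons b bs => simp [List.zip_cons_cons, ih]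

-- ===== dict-shape lemmas (dicts whose items are a map over a char list) =====
lemma pvMapDict_contains (f : Char → Int) (sub : List Char) (u : Char) :
    (⟨sub.map (fun c => (pvStr c, f c))⟩ : PySem.Dict String Int).contains (pvStr u)
      = decide (u ∈ sub) := by
  rw [PySem.Dict.contains_eq_decide_mem_keys]
  have : (⟨sub.map (fun c => (pvStr c, f c))⟩ : PySem.Dict String Int).keys = sub.map pvStr := by
    simp [PySem.Dict.keys, List.map_map, Function.comp]
  rw [this]
  by_cases h : u ∈ sub
  · simp [h, List.mem_map]
    exact ⟨u, h, rfl⟩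
  · simp [h]
    intro x hx hs
    exact absurd (pvStr_inj hs ▸ hx) h

lemma pvMapDict_get? (f : Char → Int) (sub : List Char) (u : Char)
    (hnd : sub.Nodup) (hu : u ∈ sub) :
    (⟨sub.map (fun c => (pvStr c, f c))⟩ : PySem.Dict String Int).get? (pvStr u) = some (f u) := by
  apply PySem.Dict.get?_of_mem_items
  · exact List.mem_map.mpr ⟨u, hu, rfl⟩
  · show (List.map _ (sub.map (fun c => (pvStr c, f c)))).Nodup
    rw [List.map_map]
    exact (hnd.map (fun a b h => pvStr_inj h))
lemma pvMapDict_insert (f : Char → Int) (sub : List Char) (u : Char) (w : Int) (hu : u ∈ sub) :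
    (⟨sub.map (fun c => (pvStr c, f c))⟩ : PySem.Dict String Int).insert (pvStr u) w
      = ⟨sub.map (fun c => (pvStr c, if c = u then w else f c))⟩ := by
  have hc : (⟨sub.map (fun c => (pvStr c, f c))⟩ : PySem.Dict String Int).contains (pvStr u) = true := by
    rw [pvMapDict_contains]; simpa using hu
  apply PySem.Dict.ext
  rw [PySem.Dict.items_insert_of_contains _ _ hc]
  show (sub.map (fun c => (pvStr c, f c))).map _ = _
  rw [List.map_map]
  apply List.map_congr_left
  intro c _
  by_cases hcu : c = u
  · subst hcu; simp [pvStr_beq]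
  · have hne : pvStr c ≠ pvStr u := fun hh => hcu (pvStr_inj hh)
    simp [Function.comp_def, hne, hcu]

lemma pvMapDict_erase (f : Char → Int) (sub : List Char) (h : Char) :
    (⟨sub.map (fun c => (pvStr c, f c))⟩ : PySem.Dict String Int).erase (pvStr h)
      = ⟨(sub.filter (fun c => !(c == h))).map (fun c => (pvStr c, f c))⟩ := by
  apply PySem.Dict.ext
  show (sub.map (fun c => (pvStr c, f c))).filter _ = _
  rw [List.filter_map]
  congr 1
  apply List.filter_congr
  intro c _
  simp [Function.comp, pvStr_beq]

lemma pvUpper_single (ch : Char) :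
    PySem.Str.upper (String.ofList [ch]) = pvStr (PySem.Chars.upperChar ch) := by
  simp [PySem.Str.upper, pvStr, PySem.Chars.upper]

lemma pvIsIn_single (u : Char) (s : String) :
    PySem.Str.isIn (pvStr u) s = decide (u ∈ s.toList) := by
  by_cases h : u ∈ s.toList
  · have : PySem.Chars.isIn [u] s.toList = true :=
      (PySem.Chars.isIn_iff_infix _ _).mpr ((List.singleton_infix_iff _ _).mpr h)
    simp [PySem.Str.isIn, pvStr, this, h]
  · have : ¬ ([u] <:+: s.toList) := fun hc => h ((List.singleton_infix_iff _ _).mp hc)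
    have h2 : PySem.Chars.isIn [u] s.toList = false := by
      rcases Bool.eq_false_or_eq_true (PySem.Chars.isIn [u] s.toList) with hb | hb
      · exact absurd ((PySem.Chars.isIn_iff_infix _ _).mp hb) this
      · exact hb
    simp [PySem.Str.isIn, pvStr, h2, h]

-- ===== counting phase =====
lemma pvCount_step (ch : Char) (v : Char → Int) :
    (let u := PySem.Str.upper (String.ofList [ch])
     if PySem.Str.isIn u pvLETTERS then
       if !((⟨pvLETTERS.toList.map (fun c => (pvStr c, v c))⟩ : PySem.Dict String Int).contains u) then
         (⟨pvLETTERS.toList.map (fun c => (pvStr c, v c))⟩ : PySem.Dict String Int).insert u 1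
       else
         (⟨pvLETTERS.toList.map (fun c => (pvStr c, v c))⟩ : PySem.Dict String Int).insert u
           (((⟨pvLETTERS.toList.map (fun c => (pvStr c, v c))⟩ : PySem.Dict String Int).get? u).getD 0 + 1)
     else (⟨pvLETTERS.toList.map (fun c => (pvStr c, v c))⟩ : PySem.Dict String Int))
    = (⟨pvLETTERS.toList.map (fun c => (pvStr c,
        if PySem.Chars.upperChar ch ∈ pvLETTERS.toList ∧ c = PySem.Chars.upperChar ch then v c + 1 else v c))⟩
        : PySem.Dict String Int) := by
  by_cases hU : PySem.Chars.upperChar ch ∈ pvLETTERS.toList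
  · have hnd : pvLETTERS.toList.Nodup := by decide
    simp only [pvUpper_single, pvIsIn_single, pvMapDict_contains, hU, decide_true,
      Bool.not_true, Bool.false_eq_true, if_false, if_true]
    rw [pvMapDict_get? v _ _ hnd hU, pvMapDict_insert v _ _ _ hU]
    congr 1
    apply List.map_congr_left
    intro c _
    by_cases hcu : c = PySem.Chars.upperChar ch <;> simp [hcu]
  · simp only [pvUpper_single, pvIsIn_single, hU, decide_false, Bool.false_eq_true, if_false]
    simp

lemma pvCount_phase (l : List Char) :
    ∀ v : Char → Int,
      l.foldl (fun (d : PySem.Dict String Int) letter =>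
        let u := PySem.Str.upper (String.ofList [letter])
        if PySem.Str.isIn u pvLETTERS then
          if !(d.contains u) then d.insert u 1 else d.insert u ((d.get? u).getD 0 + 1)
        else d) (⟨pvLETTERS.toList.map (fun c => (pvStr c, v c))⟩ : PySem.Dict String Int)
      = (⟨pvLETTERS.toList.map (fun c => (pvStr c, v c + ((PySem.Chars.upper l).count c : Int)))⟩ : PySem.Dict String Int) := by
  induction l with
  | nil =>
    intro v
    simp [PySem.Chars.upper]
  | cons ch l ih =>
    intro v
    rw [List.foldl_cons, pvCount_step, ih]
    congr 1
    apply List.map_congr_left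
    intro c hc
    have hup : PySem.Chars.upper (ch :: l) = PySem.Chars.upperChar ch :: PySem.Chars.upper l := rfl
    by_cases hU : PySem.Chars.upperChar ch ∈ pvLETTERS.toList
    · by_cases hcu : c = PySem.Chars.upperChar ch
      · subst hcu
        simp only [hU, hup, List.count_cons, true_and, if_true, if_pos rfl]
        simp
        omega
      · simp [hU, hup, List.count_cons, hcu, Ne.symm hcu]
    · have hcu : c ≠ PySem.Chars.upperChar ch := fun hh => hU (hh ▸ hc)
      simp [hU, hup, List.count_cons, hcu, Ne.symm hcu]

-- ===== resolve_tie =====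
lemma pvTieLoop (ct : String) :
    ∀ (fuel : Nat) (g : List Char) (acc : List String),
      g.Pairwise (· < ·) → g.length ≤ fuel →
      ∃ ys : List Char,
        pvResolveTieLoop fuel ⟨g.map (fun c => (pvStr c, pvFnd (pvUp ct) c))⟩ acc
          = acc ++ ys.map pvStr ∧ ys.Perm g ∧ ys.Pairwise (pvOrd2 (pvUp ct)) := by
  intro fuel
  induction fuel with
  | zero =>
    intro g acc hpw hlen
    have hg : g = [] := List.eq_nil_of_length_eq_zero (Nat.le_zero.mp hlen)
    exact ⟨[], by simp [pvResolveTieLoop], by simp [hg], by simp⟩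
  | succ fuel ih =>
    intro g acc hpw hlen
    cases g with
    | nil => exact ⟨[], by simp [pvResolveTieLoop], by simp, by simp⟩
    | cons c0 gt =>
      have hnd : (c0 :: gt).Nodup := hpw.imp ne_of_lt
      have hne : ((c0 :: gt).map (fun c => (pvStr c, pvFnd (pvUp ct) c))).length ≠ 0 := by simp
      have hvals : (⟨(c0 :: gt).map (fun c => (pvStr c, pvFnd (pvUp ct) c))⟩ : PySem.Dict String Int).values
          = (c0 :: gt).map (pvFnd (pvUp ct)) := by
        show ((c0 :: gt).map (fun c => (pvStr c, pvFnd (pvUp ct) c))).map _ = _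
        rw [List.map_map]; rfl
      cases hmin : PySem.List.min? ((⟨(c0 :: gt).map (fun c => (pvStr c, pvFnd (pvUp ct) c))⟩ : PySem.Dict String Int).values) (fun v => v) with
      | none =>
        rw [PySem.List.min?_eq_none_iff, hvals] at hmin
        simp at hmin
      | some mn =>
        have hmem' : mn ∈ (c0 :: gt).map (pvFnd (pvUp ct)) := by
          have := PySem.List.min?_mem hmin; rwa [hvals] at this
        have hmnmin : ∀ y ∈ (c0 :: gt).map (pvFnd (pvUp ct)), mn ≤ y := by
          intro y hy
          have := PySem.List.min?_isMin hmin (y := y)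
          rw [hvals] at this
          exact this hy
        have hfil : ((⟨(c0 :: gt).map (fun c => (pvStr c, pvFnd (pvUp ct) c))⟩ : PySem.Dict String Int).items.filter
              (fun kv => kv.2 == mn)).map (fun kv => kv.1)
            = ((c0 :: gt).filter (fun c => pvFnd (pvUp ct) c == mn)).map pvStr := by
          show (((c0 :: gt).map (fun c => (pvStr c, pvFnd (pvUp ct) c))).filter _).map _ = _
          rw [List.filter_map, List.map_map]; rfl
        have hgfne : (c0 :: gt).filter (fun c => pvFnd (pvUp ct) c == mn) ≠ [] := by
          rcases List.mem_map.mp hmem' with ⟨h0, hh0, hfd⟩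
          intro hnil
          have : h0 ∈ (c0 :: gt).filter (fun c => pvFnd (pvUp ct) c == mn) :=
            List.mem_filter.mpr ⟨hh0, by simp [hfd]⟩
          simp [hnil] at this
        cases hgf : (c0 :: gt).filter (fun c => pvFnd (pvUp ct) c == mn) with
        | nil => exact absurd hgf hgfne
        | cons h tf =>
          have hhg : h ∈ (c0 :: gt) ∧ (pvFnd (pvUp ct) h == mn) = true := by
            have : h ∈ (c0 :: gt).filter (fun c => pvFnd (pvUp ct) c == mn) := by
              rw [hgf]; exact List.mem_cons_self
            exact ⟨List.mem_of_mem_filter this, (List.mem_filter.mp this).2⟩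
          have hfh : pvFnd (pvUp ct) h = mn := beq_iff_eq.mp hhg.2
          have herase : (⟨(c0 :: gt).map (fun c => (pvStr c, pvFnd (pvUp ct) c))⟩ : PySem.Dict String Int).erase (pvStr h)
              = ⟨((c0 :: gt).filter (fun c => !(c == h))).map (fun c => (pvStr c, pvFnd (pvUp ct) c))⟩ :=
            pvMapDict_erase _ _ _
          have hg'len : ((c0 :: gt).filter (fun c => !(c == h))).length ≤ fuel := by
            have h1 : (c0 :: gt).erase h = (c0 :: gt).filter (fun c => c != h) := hnd.erase_eq_filter h
            have h2 : ((c0 :: gt).erase h).length = (c0 :: gt).length - 1 :=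
              List.length_erase_of_mem hhg.1
            have h3 : (c0 :: gt).filter (fun c => c != h) = (c0 :: gt).filter (fun c => !(c == h)) := rfl
            rw [← h3, ← h1, h2]
            have := hlen
            simp at this ⊢
            omega
          obtain ⟨ys', heq', hperm', hpw2'⟩ :=
            ih ((c0 :: gt).filter (fun c => !(c == h))) (acc ++ [pvStr h]) (hpw.filter _) hg'len
          refine ⟨h :: ys', ?_, ?_, ?_⟩
          · show pvResolveTieLoop (fuel + 1) _ acc = _
            rw [pvResolveTieLoop]
            simp only [hne, if_false, hmin, hfil]
            rw [hgf]
            rw [show ((h :: tf).map pvStr) = pvStr h :: tf.map pvStr from rfl,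
              PySem.List.pyGet?_zero_cons]
            show pvResolveTieLoop fuel
                ((⟨(c0 :: gt).map (fun c => (pvStr c, pvFnd (pvUp ct) c))⟩ : PySem.Dict String Int).erase (pvStr h))
                (acc ++ [pvStr h]) = _
            rw [herase, heq']
            simp
          · have h1 : (c0 :: gt).erase h = (c0 :: gt).filter (fun c => c != h) := hnd.erase_eq_filter h
            have : (h :: ys').Perm (h :: (c0 :: gt).filter (fun c => !(c == h))) := hperm'.cons h
            refine this.trans ?_
            have h3 : (c0 :: gt).filter (fun c => c != h) = (c0 :: gt).filter (fun c => !(c == h)) := rfl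
            rw [← h3, ← h1]
            exact (List.perm_cons_erase hhg.1).symm
          · rw [List.pairwise_cons]
            refine ⟨?_, hpw2'⟩
            intro y hy
            have hyg' : y ∈ (c0 :: gt).filter (fun c => !(c == h)) := hperm'.subset hy
            have hyg : y ∈ (c0 :: gt) := List.mem_of_mem_filter hyg'
            have hyne : y ≠ h := by
              have := (List.mem_filter.mp hyg').2
              simpa using this
            have hle : mn ≤ pvFnd (pvUp ct) y := hmnmin _ (List.mem_map_of_mem hyg)
            rcases lt_or_eq_of_le hle with hlt | heq
            · exact Or.inl (hfh ▸ hlt)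
            · have hyf : y ∈ (c0 :: gt).filter (fun c => pvFnd (pvUp ct) c == mn) :=
                List.mem_filter.mpr ⟨hyg, by simp [heq.symm]⟩
              rw [hgf] at hyf
              have hytf : y ∈ tf := by
                rcases List.mem_cons.mp hyf with rfl | hh
                · exact absurd rfl hyne
                · exact hh
              have hpf : ((c0 :: gt).filter (fun c => pvFnd (pvUp ct) c == mn)).Pairwise (· < ·) :=
                hpw.filter _
              rw [hgf, List.pairwise_cons] at hpf
              have hlt2 : h < y := hpf.1 y hytf
              exact Or.inr ⟨by rw [hfh, ← heq], pvCharLt hlt2⟩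

lemma pvResolveTie_eq (ct : String) (g : List Char) (hpw : g.Pairwise (· < ·)) :
    ∃ ys : List Char,
      pvResolveTie (g.map pvStr) ct = ys.map pvStr ∧ ys.Perm g ∧ ys.Pairwise (pvOrd2 (pvUp ct)) := by
  have hndg : g.Nodup := hpw.imp ne_of_lt
  have hnd : (g.map pvStr).Nodup := hndg.map (fun a b h => pvStr_inj h)
  have hitems : ((g.map pvStr).foldl
      (fun d l => d.insert l (PySem.Str.find (PySem.Str.upper ct) l)) PySem.Dict.empty).items
      = g.map (fun c => (pvStr c, pvFnd (pvUp ct) c)) := by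
    have := PySem.Dict.items_foldl_insert_fresh (g.map pvStr) (fun l => l)
      (fun l => PySem.Str.find (PySem.Str.upper ct) l) PySem.Dict.empty
      (fun a _ => PySem.Dict.contains_empty _) (by simpa using hnd)
    rw [this]
    simp only [List.map_map]
    rw [List.map_congr_left]
    · rfl
    · intro c _
      show (pvStr c, PySem.Str.find (PySem.Str.upper ct) (pvStr c)) = _
      have : PySem.Str.find (PySem.Str.upper ct) (pvStr c) = pvFnd (pvUp ct) c := by
        rw [PySem.Str.find_eq]
        simp [pvStr, pvFnd, pvUp]
      rw [this]
  unfold pvResolveTie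
  have hd : ((g.map pvStr).foldl
      (fun d l => d.insert l (PySem.Str.find (PySem.Str.upper ct) l)) PySem.Dict.empty)
      = (⟨g.map (fun c => (pvStr c, pvFnd (pvUp ct) c))⟩ : PySem.Dict String Int) :=
    PySem.Dict.ext hitems
  rw [hd]
  have hlen : (g.map (fun c => (pvStr c, pvFnd (pvUp ct) c))).length = g.length := by simp
  show ∃ ys, pvResolveTieLoop (List.length _) _ [] = _ ∧ _
  rw [hlen]
  obtain ⟨ys, heq, hperm, hpw2⟩ := pvTieLoop ct g.length g [] hpw le_rfl
  exact ⟨ys, by rw [heq]; simp, hperm, hpw2⟩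

-- ===== the split of the sorted order at a maximal-count group =====
lemma pvSorted_split (up : List Char) (sub : List Char) (m : Int) (hnd : sub.Nodup)
    (ys : List Char)
    (hperm : ys.Perm (sub.filter (fun c => pvCnt up c == m)))
    (hmax : ∀ c ∈ sub, pvCnt up c ≤ m)
    (hpw : ys.Pairwise (fun a b => pvKey up a < pvKey up b)) :
    PySem.List.sorted sub (pvKey up)
      = ys ++ PySem.List.sorted (sub.filter (fun c => !(pvCnt up c == m))) (pvKey up) := by
  have hnd' : (sub.filter (fun c => !(pvCnt up c == m))).Nodup := hnd.filter _
  have hpermS := PySem.List.sorted_perm (sub.filter (fun c => !(pvCnt up c == m))) (pvKey up) false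
  have hndS : (PySem.List.sorted (sub.filter (fun c => !(pvCnt up c == m))) (pvKey up)).Nodup :=
    hpermS.nodup_iff.mpr hnd'
  have hstrict : (PySem.List.sorted (sub.filter (fun c => !(pvCnt up c == m))) (pvKey up)).Pairwise
      (fun a b => pvKey up a < pvKey up b) := by
    have hle := PySem.List.sorted_pairwise (sub.filter (fun c => !(pvCnt up c == m))) (pvKey up)
    exact (hle.and hndS).imp (fun h => lt_of_le_of_ne h.1 (fun he => h.2 (pvKey_inj up he)))
  apply PySem.List.sorted_eq_of_perm_of_pairwise_lt
  · refine ((hperm.append hpermS).trans ?_)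
    exact List.filter_append_perm _ sub
  · rw [List.pairwise_append]
    refine ⟨hpw, hstrict, ?_⟩
    intro a ha b hb
    have hca : pvCnt up a = m := by
      have := (List.mem_filter.mp (hperm.subset ha)).2
      exact beq_iff_eq.mp this
    have hbmem := hpermS.subset hb
    have hcb : ¬ (pvCnt up b = m) := by
      have := (List.mem_filter.mp hbmem).2
      simpa using this
    have hble : pvCnt up b ≤ m := hmax b (List.mem_of_mem_filter hbmem)
    have : pvCnt up b < pvCnt up a := by rw [hca]; exact lt_of_le_of_ne hble hcb
    rw [pvKey_lt_iff]
    exact Or.inl (by omega)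

lemma pvContains_false_iff {ν : Type} (d : PySem.Dict String ν) (k : String) :
    d.contains k = false ↔ k ∉ d.keys := by
  rw [PySem.Dict.contains_eq_decide_mem_keys]
  simp

lemma pvEta_len : pvETAION.toList.length = 26 := rfl

lemma pvEta_get (j : Nat) (hj : j < 26) :
    PySem.Str.pyGet? pvETAION (j : Int) = some (pvETAION.toList[j]'(by rw [pvEta_len]; exact hj)) := by
  rw [PySem.Str.pyGet?_eq]
  show PySem.List.pyGet? _ _ = _
  rw [PySem.List.pyGet?_natCast]
  exact List.getElem?_eq_getElem _

-- ===== the fold inside the tie branch =====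
lemma pvTie_fold (ct : String) :
    ∀ (ys sub : List Char) (lm : PySem.Dict String String) (j : Nat),
      (∀ c ∈ ys, c ∈ sub) → ys.Nodup → sub.Nodup →
      (∀ c ∈ sub, lm.contains (pvStr c) = false) →
      j + sub.length = 26 →
      (ys.map pvStr).foldl
        (fun (s : PySem.Dict String String × PySem.Dict String Int × Int) ol =>
          match PySem.Str.pyGet? pvETAION s.2.2 with
          | none => s
          | some p => (s.1.insert ol (String.ofList [p]), s.2.1.erase ol, s.2.2 + 1))
        (lm, pvDictOf (pvUp ct) sub, (j : Int))
      = (⟨lm.items ++ (ys.map pvStr).zip ((pvETAION.toList.drop j).map pvStr)⟩,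
         pvDictOf (pvUp ct) (sub.filter (fun c => !decide (c ∈ ys))),
         ((j + ys.length : Nat) : Int)) := by
  intro ys
  induction ys with
  | nil =>
    intro sub lm j hmem hnd hsnd hdisj hlen
    simp
  | cons y ys' ih =>
    intro sub lm j hmem hnd hsnd hdisj hlen
    have hysub : y ∈ sub := hmem y List.mem_cons_self
    have hsubpos : 1 ≤ sub.length := List.length_pos_iff.mpr (List.ne_nil_of_mem hysub)
    have hj26 : j < 26 := by omega
    have hjlt : j < pvETAION.toList.length := by rw [pvEta_len]; exact hj26
    have hget := pvEta_get j hj26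
    have hcont : lm.contains (pvStr y) = false := hdisj y hysub
    have hins := PySem.Dict.items_insert_of_not_contains lm
      (String.ofList [pvETAION.toList[j]'hjlt]) hcont
    have herase := pvMapDict_erase (pvCnt (pvUp ct)) sub y
    rw [List.map_cons, List.foldl_cons]
    have hstep : (match PySem.Str.pyGet? pvETAION ((lm, pvDictOf (pvUp ct) sub, (j : Int)) :
            PySem.Dict String String × PySem.Dict String Int × Int).2.2 with
          | none => ((lm, pvDictOf (pvUp ct) sub, (j : Int)) :
              PySem.Dict String String × PySem.Dict String Int × Int)
          | some p => ((lm, pvDictOf (pvUp ct) sub, (j : Int)).1.insert (pvStr y) (String.ofList [p]),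
              (lm, pvDictOf (pvUp ct) sub, (j : Int)).2.1.erase (pvStr y),
              (lm, pvDictOf (pvUp ct) sub, (j : Int)).2.2 + 1))
        = (⟨lm.items ++ [(pvStr y, pvStr (pvETAION.toList[j]'hjlt))]⟩,
           pvDictOf (pvUp ct) (sub.filter (fun c => !(c == y))),
           ((j + 1 : Nat) : Int)) := by
      show (match PySem.Str.pyGet? pvETAION (j : Int) with
        | none => (lm, pvDictOf (pvUp ct) sub, (j : Int))
        | some p => (lm.insert (pvStr y) (String.ofList [p]),
            (pvDictOf (pvUp ct) sub).erase (pvStr y), (j : Int) + 1)) = _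
      rw [hget]
      refine Prod.ext ?_ (Prod.ext ?_ ?_)
      · exact PySem.Dict.ext hins
      · exact herase
      · show (j : Int) + 1 = _
        push_cast
        ring
    rw [hstep]
    have hnd' : ys'.Nodup := (List.nodup_cons.mp hnd).2
    have hyny : y ∉ ys' := (List.nodup_cons.mp hnd).1
    have hmem' : ∀ c ∈ ys', c ∈ sub.filter (fun c => !(c == y)) := by
      intro c hc
      refine List.mem_filter.mpr ⟨hmem c (List.mem_cons_of_mem _ hc), ?_⟩
      have : c ≠ y := fun hh => hyny (hh ▸ hc)
      simpa using this
    have hdisj' : ∀ c ∈ sub.filter (fun c => !(c == y)),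
        (⟨lm.items ++ [(pvStr y, pvStr (pvETAION.toList[j]'hjlt))]⟩ :
          PySem.Dict String String).contains (pvStr c) = false := by
      intro c hc
      have hcs : c ∈ sub := List.mem_of_mem_filter hc
      have hcy : c ≠ y := by have := (List.mem_filter.mp hc).2; simpa using this
      rw [pvContains_false_iff]
      show pvStr c ∉ (lm.items ++ _).map Prod.fst
      rw [List.map_append]
      intro hmm
      rcases List.mem_append.mp hmm with hmm | hmm
      · exact (pvContains_false_iff lm (pvStr c)).mp (hdisj c hcs) hmm
      · simp at hmm
        exact hcy (pvStr_inj hmm)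
    have hlen' : (j + 1) + (sub.filter (fun c => !(c == y))).length = 26 := by
      have h1 : sub.erase y = sub.filter (fun c => c != y) := hsnd.erase_eq_filter y
      have h2 : (sub.erase y).length = sub.length - 1 := List.length_erase_of_mem hysub
      have h3 : sub.filter (fun c => c != y) = sub.filter (fun c => !(c == y)) := rfl
      rw [← h3, ← h1, h2]
      omega
    rw [ih (sub.filter (fun c => !(c == y))) _ (j + 1) hmem' hnd' (hsnd.filter _) hdisj' hlen']
    have hdrop : pvETAION.toList.drop j = pvETAION.toList[j]'hjlt :: pvETAION.toList.drop (j + 1) :=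
      List.drop_eq_getElem_cons hjlt
    refine Prod.ext ?_ (Prod.ext ?_ ?_)
    · apply PySem.Dict.ext
      show (lm.items ++ _) ++ _ = lm.items ++ _
      rw [List.append_assoc]
      congr 1
      rw [hdrop, List.map_cons, List.zip_cons_cons, List.singleton_append]
    · show pvDictOf (pvUp ct) _ = pvDictOf (pvUp ct) _
      apply congrArg
      rw [List.filter_filter]
      apply List.filter_congr
      intro c _
      by_cases hcy : c = y
      · simp [hcy]
      · by_cases hcm : c ∈ ys' <;> simp [hcy, hcm]
    · show (((j + 1) + ys'.length : Nat) : Int) = _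
      congr 1
      simp
      omega

-- ===== the main loop =====
lemma pvFreqLoop_eq (ct : String) :
    ∀ (fuel : Nat) (sub : List Char) (lm : PySem.Dict String String) (j : Nat),
      sub.Sublist pvLETTERS.toList → sub.length ≤ fuel → j + sub.length = 26 →
      (∀ c ∈ sub, lm.contains (pvStr c) = false) →
      pvFreqLoop fuel (pvDictOf (pvUp ct) sub) lm (j : Int) ct
        = ⟨lm.items ++ ((PySem.List.sorted sub (pvKey (pvUp ct))).map pvStr).zip
            ((pvETAION.toList.drop j).map pvStr)⟩ := by
  intro fuel
  induction fuel with
  | zero =>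
    intro sub lm j hsub hfuel hj hdisj
    have hsnil : sub = [] := List.eq_nil_of_length_eq_zero (Nat.le_zero.mp hfuel)
    subst hsnil
    show lm = _
    rw [show PySem.List.sorted ([] : List Char) (pvKey (pvUp ct)) = [] from rfl]
    apply PySem.Dict.ext
    simp
  | succ fuel ih =>
    intro sub lm j hsub hfuel hj hdisj
    have hLnd : pvLETTERS.toList.Nodup := by decide
    have hLpw : pvLETTERS.toList.Pairwise (· < ·) := by decide
    have hsnd : sub.Nodup := hLnd.sublist hsub
    have hspw : sub.Pairwise (· < ·) := hLpw.sublist hsub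
    rcases hsubc : sub with _ | ⟨c0, st⟩
    · show lm = _
      rw [show PySem.List.sorted ([] : List Char) (pvKey (pvUp ct)) = [] from rfl]
      apply PySem.Dict.ext
      simp
    · subst hsubc
      have hlenpos : 0 < (c0 :: st).length := by simp
      have hj26 : j < 26 := by have := hj; simp at this; omega
      have hvals : (pvDictOf (pvUp ct) (c0 :: st)).values = (c0 :: st).map (pvCnt (pvUp ct)) := by
        show ((c0 :: st).map (fun c => (pvStr c, pvCnt (pvUp ct) c))).map _ = _
        rw [List.map_map]; rfl
      have hcond : ¬ ((pvDictOf (pvUp ct) (c0 :: st)).items.length = 0 ∨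
          (j : Int) ≥ PySem.Str.len pvETAION) := by
        have h26 : PySem.Str.len pvETAION = 26 := by decide
        push_neg
        constructor
        · show ((c0 :: st).map _).length ≠ 0
          simp
        · rw [h26]
          exact_mod_cast hj26
      cases hmax : PySem.List.max? ((pvDictOf (pvUp ct) (c0 :: st)).values) (fun v => v) with
      | none =>
        rw [PySem.List.max?_eq_none_iff, hvals] at hmax
        simp at hmax
      | some m =>
        have hm_mem : m ∈ (c0 :: st).map (pvCnt (pvUp ct)) := by
          have := PySem.List.max?_mem hmax; rwa [hvals] at this
        have hm_max : ∀ c ∈ (c0 :: st), pvCnt (pvUp ct) c ≤ m := by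
          intro c hc
          have := PySem.List.max?_isMax hmax (y := pvCnt (pvUp ct) c)
          rw [hvals] at this
          exact this (List.mem_map_of_mem hc)
        have hfil : ((pvDictOf (pvUp ct) (c0 :: st)).items.filter
              (fun kv => kv.2 == m)).map (fun kv => kv.1)
            = ((c0 :: st).filter (fun c => pvCnt (pvUp ct) c == m)).map pvStr := by
          show (((c0 :: st).map (fun c => (pvStr c, pvCnt (pvUp ct) c))).filter _).map _ = _
          rw [List.filter_map, List.map_map]; rfl
        have hgne : (c0 :: st).filter (fun c => pvCnt (pvUp ct) c == m) ≠ [] := by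
          rcases List.mem_map.mp hm_mem with ⟨h0, hh0, hfd⟩
          intro hnil
          have : h0 ∈ (c0 :: st).filter (fun c => pvCnt (pvUp ct) c == m) :=
            List.mem_filter.mpr ⟨hh0, by simp [hfd]⟩
          simp [hnil] at this
        have hgsub : ∀ c ∈ (c0 :: st).filter (fun c => pvCnt (pvUp ct) c == m), c ∈ (c0 :: st) :=
          fun c hc => List.mem_of_mem_filter hc
        have hsplit := (List.filter_append_perm (fun c => pvCnt (pvUp ct) c == m) (c0 :: st)).length_eq
        rw [List.length_append] at hsplit
        rw [pvFreqLoop]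
        rw [if_neg hcond, hmax]
        simp only []
        rw [hfil]
        by_cases hg1 : (((c0 :: st).filter (fun c => pvCnt (pvUp ct) c == m)).map pvStr).length > 1
        · rw [if_pos hg1]
          have hglen : 2 ≤ ((c0 :: st).filter (fun c => pvCnt (pvUp ct) c == m)).length := by
            simpa using hg1
          obtain ⟨ys, heqR, hperm, hpw2⟩ :=
            pvResolveTie_eq ct ((c0 :: st).filter (fun c => pvCnt (pvUp ct) c == m)) (hspw.filter _)
          rw [heqR]
          rw [pvTie_fold ct ys (c0 :: st) lm j
            (fun c hc => hgsub c (hperm.subset hc))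
            (hperm.nodup_iff.mpr (hsnd.filter _)) hsnd hdisj hj]
          have hyslen : ys.length = ((c0 :: st).filter (fun c => pvCnt (pvUp ct) c == m)).length :=
            hperm.length_eq
          have hfilcongr : (c0 :: st).filter (fun c => !decide (c ∈ ys))
              = (c0 :: st).filter (fun c => !(pvCnt (pvUp ct) c == m)) := by
            apply List.filter_congr
            intro c hc
            have : (c ∈ ys) ↔ (pvCnt (pvUp ct) c == m) = true := by
              rw [hperm.mem_iff, List.mem_filter]
              constructor
              · exact fun h => h.2
              · exact fun h => ⟨hc, h⟩
            by_cases hb : c ∈ ys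
            · simp [hb, this.mp hb]
            · have : ¬ ((pvCnt (pvUp ct) c == m) = true) := fun hh => hb (this.mpr hh)
              simp [hb, this]
          rw [hfilcongr]
          rw [ih ((c0 :: st).filter (fun c => !(pvCnt (pvUp ct) c == m)))
            _ (j + ys.length)
            ((List.filter_sublist).trans hsub)
            (by omega)
            (by omega)
            ?_]
          · apply PySem.Dict.ext
            show (lm.items ++ _) ++ _ = lm.items ++ _
            rw [List.append_assoc]
            congr 1
            have hpwK : ys.Pairwise (fun a b => pvKey (pvUp ct) a < pvKey (pvUp ct) b) := by
              refine List.Pairwise.imp_of_mem ?_ hpw2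
              intro a b ha hb hab
              have hca : pvCnt (pvUp ct) a = m :=
                beq_iff_eq.mp (List.mem_filter.mp (hperm.subset ha)).2
              have hcb : pvCnt (pvUp ct) b = m :=
                beq_iff_eq.mp (List.mem_filter.mp (hperm.subset hb)).2
              rw [pvKey_lt_iff]
              exact Or.inr ⟨hca.trans hcb.symm, hab⟩
            rw [pvSorted_split (pvUp ct) (c0 :: st) m hsnd ys hperm hm_max hpwK]
            rw [List.map_append, pvZip_append_split]
            congr 1
            rw [List.length_map, hyslen]
            rw [← List.map_drop, List.drop_drop]
          · intro c hc
            have hcs : c ∈ (c0 :: st) := List.mem_of_mem_filter hc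
            have hcy : c ∉ ys := by
              intro hcon
              have hcg := hperm.subset hcon
              have h2 := (List.mem_filter.mp hcg).2
              have h3 := (List.mem_filter.mp hc).2
              rw [h2] at h3
              simp at h3
            rw [pvContains_false_iff]
            show pvStr c ∉ (lm.items ++ _).map Prod.fst
            rw [List.map_append]
            intro hmm
            rcases List.mem_append.mp hmm with hmm | hmm
            · exact (pvContains_false_iff lm (pvStr c)).mp (hdisj c hcs) hmm
            · have hzf : ((ys.map pvStr).zip ((pvETAION.toList.drop j).map pvStr)).map Prod.fst
                  = ys.map pvStr := by
                apply List.map_fst_zip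
                rw [List.length_map, List.length_map, List.length_drop, pvEta_len, hyslen]
                omega
              rw [hzf] at hmm
              rcases List.mem_map.mp hmm with ⟨d, hd, hds⟩
              exact hcy (pvStr_inj hds ▸ hd)
        · rw [if_neg hg1]
          have hglen : ((c0 :: st).filter (fun c => pvCnt (pvUp ct) c == m)).length = 1 := by
            have h0 : 0 < ((c0 :: st).filter (fun c => pvCnt (pvUp ct) c == m)).length :=
              List.length_pos_iff.mpr hgne
            simp at hg1
            omega
          obtain ⟨h, hh⟩ := List.length_eq_one_iff.mp hglen
          have hhg : h ∈ (c0 :: st).filter (fun c => pvCnt (pvUp ct) c == m) := by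
            rw [hh]; exact List.mem_cons_self
          have hhsub : h ∈ (c0 :: st) := List.mem_of_mem_filter hhg
          rw [hh]
          rw [show ([h].map pvStr) = [pvStr h] from rfl, PySem.List.pyGet?_zero_cons]
          rw [pvEta_get j hj26]
          have herase := pvMapDict_erase (pvCnt (pvUp ct)) (c0 :: st) h
          show pvFreqLoop fuel ((pvDictOf (pvUp ct) (c0 :: st)).erase (pvStr h))
              (lm.insert (pvStr h)
                (String.ofList [pvETAION.toList[j]'(by rw [pvEta_len]; exact hj26)]))
              ((j : Int) + 1) ct = _
          rw [show (pvDictOf (pvUp ct) (c0 :: st)).erase (pvStr h)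
              = pvDictOf (pvUp ct) ((c0 :: st).filter (fun c => !(c == h))) from herase]
          have hins := PySem.Dict.items_insert_of_not_contains lm
            (String.ofList [pvETAION.toList[j]'(by rw [pvEta_len]; exact hj26)]) (hdisj h hhsub)
          have hfilcongr : (c0 :: st).filter (fun c => !(c == h))
              = (c0 :: st).filter (fun c => !(pvCnt (pvUp ct) c == m)) := by
            apply List.filter_congr
            intro c hc
            have hiff : c = h ↔ (pvCnt (pvUp ct) c == m) = true := by
              constructor
              · rintro rfl
                exact (List.mem_filter.mp hhg).2
              · intro hcm
                have : c ∈ (c0 :: st).filter (fun c => pvCnt (pvUp ct) c == m) :=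
                  List.mem_filter.mpr ⟨hc, hcm⟩
                rw [hh] at this
                simpa using this
            by_cases hb : c = h
            · subst hb
              simp [beq_iff_eq.mp (List.mem_filter.mp hhg).2]
            · have : ¬ ((pvCnt (pvUp ct) c == m) = true) := fun hcm => hb (hiff.mpr hcm)
              simp [hb, this]
          have hlenf : ((c0 :: st).filter (fun c => !(c == h))).length = (c0 :: st).length - 1 := by
            have h1 : (c0 :: st).erase h = (c0 :: st).filter (fun c => c != h) :=
              hsnd.erase_eq_filter h
            have h2 : ((c0 :: st).erase h).length = (c0 :: st).length - 1 :=
              List.length_erase_of_mem hhsub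
            have h3 : (c0 :: st).filter (fun c => c != h) = (c0 :: st).filter (fun c => !(c == h)) := rfl
            rw [← h3, ← h1, h2]
          have hcast : (j : Int) + 1 = ((j + 1 : Nat) : Int) := by push_cast; ring
          rw [hcast]
          have hlm' : lm.insert (pvStr h)
                (String.ofList [pvETAION.toList[j]'(by rw [pvEta_len]; exact hj26)])
              = (⟨lm.items ++ [(pvStr h, pvStr (pvETAION.toList[j]'(by rw [pvEta_len]; exact hj26)))]⟩ :
                  PySem.Dict String String) :=
            PySem.Dict.ext hins
          rw [hlm']
          rw [ih ((c0 :: st).filter (fun c => !(c == h))) _ (j + 1)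
            ((List.filter_sublist).trans hsub)
            (by rw [hlenf]; simp at hfuel ⊢; omega)
            (by rw [hlenf]; simp at hj ⊢; omega)
            ?_]
          · apply PySem.Dict.ext
            show (lm.items ++ _) ++ _ = lm.items ++ _
            rw [List.append_assoc]
            congr 1
            have hpwK : ([h] : List Char).Pairwise (fun a b => pvKey (pvUp ct) a < pvKey (pvUp ct) b) := by
              simp
            have hperm1 : ([h] : List Char).Perm ((c0 :: st).filter (fun c => pvCnt (pvUp ct) c == m)) := by
              rw [hh]
            rw [hfilcongr, pvSorted_split (pvUp ct) (c0 :: st) m hsnd [h] hperm1 hm_max hpwK]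
            have hdrop : pvETAION.toList.drop j
                = pvETAION.toList[j]'(by rw [pvEta_len]; exact hj26) :: pvETAION.toList.drop (j + 1) :=
              List.drop_eq_getElem_cons _
            rw [hdrop]
            rw [show (([h] ++ PySem.List.sorted ((c0 :: st).filter (fun c => !(pvCnt (pvUp ct) c == m))) (pvKey (pvUp ct))).map pvStr)
                = pvStr h :: (PySem.List.sorted ((c0 :: st).filter (fun c => !(pvCnt (pvUp ct) c == m))) (pvKey (pvUp ct))).map pvStr from rfl]
            rw [List.map_cons, List.zip_cons_cons, List.singleton_append]
          · intro c hc
            have hcs : c ∈ (c0 :: st) := List.mem_of_mem_filter hc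
            have hcy : c ≠ h := by
              have := (List.mem_filter.mp hc).2
              simpa using this
            rw [pvContains_false_iff]
            show pvStr c ∉ (lm.items ++ _).map Prod.fst
            rw [List.map_append]
            intro hmm
            rcases List.mem_append.mp hmm with hmm | hmm
            · exact (pvContains_false_iff lm (pvStr c)).mp (hdisj c hcs) hmm
            · simp at hmm
              exact hcy (pvStr_inj hmm)

-- ===== B-side bridges =====
lemma pvCount_go (c : Char) :
    ∀ (s : List Char) (fuel acc : Nat), s.length ≤ fuel →
      PySem.Chars.count.go [c] fuel s acc = acc + s.count c := by
  intro s
  induction s with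
  | nil =>
    intro fuel acc h
    cases fuel <;> simp [PySem.Chars.count.go]
  | cons a t ih =>
    intro fuel acc h
    cases fuel with
    | zero => simp at h
    | succ f =>
      have hf : t.length ≤ f := by simp at h; omega
      by_cases hac : c = a
      · have hpre : ([c].isPrefixOf (a :: t)) = true := by simp [List.isPrefixOf, hac]
        simp only [PySem.Chars.count.go, hpre, if_true]
        rw [show List.drop ([c] : List Char).length (a :: t) = t from rfl]
        rw [ih f (acc + 1) hf]
        rw [List.count_cons]
        simp [hac]
        omega
      · have hpre : ([c].isPrefixOf (a :: t)) = false := by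
          simp [List.isPrefixOf]
          exact fun hh => hac hh
        simp only [PySem.Chars.count.go, hpre, Bool.false_eq_true, if_false]
        rw [ih f acc hf]
        rw [List.count_cons]
        have hca : ¬ a = c := fun hh => hac hh.symm
        simp [hca]
lemma pvCount_single (s : List Char) (c : Char) : PySem.Chars.count s [c] = s.count c := by
  unfold PySem.Chars.count
  rw [if_neg (by simp)]
  have := pvCount_go c s s.length 0 le_rfl
  simpa using this

lemma pvCmp_eq (up : List Char) {x y : Char} (hxy : y < x) :
    ((decide ((fun c => -(pvCnt up c)) x < (fun c => -(pvCnt up c)) y)) ||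
      (!decide ((fun c => -(pvCnt up c)) y < (fun c => -(pvCnt up c)) x) &&
        decide ((fun c => pvFnd up c) x < (fun c => pvFnd up c) y)))
      = decide (pvKey up x < pvKey up y) := by
  simp only []
  have hn3 : ¬ ((x.toNat : Int) < (y.toNat : Int)) := by
    have := pvCharLt hxy
    omega
  by_cases h1 : -pvCnt up x < -pvCnt up y
  · have hkk : pvKey up x < pvKey up y := (pvKey_lt_iff up x y).mpr (Or.inl h1)
    simp [h1, hkk]
  · by_cases h2 : -pvCnt up y < -pvCnt up x
    · have hkk : ¬ pvKey up x < pvKey up y := by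
        rw [pvKey_lt_iff]
        rintro (hh | ⟨hh2, -⟩) <;> omega
      simp [h1, h2, hkk]
    · have hcc : pvCnt up x = pvCnt up y := by omega
      by_cases h3 : pvFnd up x < pvFnd up y
      · have hkk : pvKey up x < pvKey up y := (pvKey_lt_iff up x y).mpr (Or.inr ⟨hcc, Or.inl h3⟩)
        simp [h1, h2, h3, hkk]
      · have hkk : ¬ pvKey up x < pvKey up y := by
          rw [pvKey_lt_iff]
          rintro (hh | ⟨-, hh | ⟨-, hh⟩⟩)
          · omega
          · omega
          · exact hn3 hh
        simp [h1, h2, h3, hkk]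

lemma pvSorted2_eq (up : List Char) :
    PySem.List.sorted2 pvLETTERS.toList (fun c => -(pvCnt up c)) (fun c => pvFnd up c)
      = PySem.List.sorted pvLETTERS.toList (pvKey up) := by
  have hLpw : pvLETTERS.toList.Pairwise (· < ·) := by decide
  show pvLETTERS.toList.foldl
      (fun acc x => PySem.List.insertBy (fun a b =>
        decide ((fun c => -(pvCnt up c)) a < (fun c => -(pvCnt up c)) b) ||
        (!decide ((fun c => -(pvCnt up c)) b < (fun c => -(pvCnt up c)) a) &&
          decide ((fun c => pvFnd up c) a < (fun c => pvFnd up c) b))) x acc) []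
    = pvLETTERS.toList.foldl
      (fun acc x => PySem.List.insertBy (fun a b => decide (pvKey up a < pvKey up b)) x acc) []
  apply pvFoldl_insertBy_congr
  · intro x _ y hy
    simp at hy
  · exact hLpw.imp (fun h => pvCmp_eq up h)

-- ===== VERDICT (by name: the statement is the Claim_ definition above) =====
set_option maxHeartbeats 2000000 in
theorem freqDict_spec : Claim_equal_freqDict := by
  intro ct _
  show freqDict ct = freqDict_alt ct
  have hLnd : pvLETTERS.toList.Nodup := by decide
  have hom0 : pvLETTERS.toList.foldl
        (fun (d : PySem.Dict String Int) letter => d.insert (String.ofList [letter]) 0)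
        PySem.Dict.empty
      = (⟨pvLETTERS.toList.map (fun c => (pvStr c, (0 : Int)))⟩ : PySem.Dict String Int) := by
    apply PySem.Dict.ext
    have h1 := PySem.Dict.items_foldl_insert_fresh pvLETTERS.toList
      (fun letter => String.ofList [letter]) (fun _ => (0 : Int)) PySem.Dict.empty
      (fun a _ => PySem.Dict.contains_empty _)
      (hLnd.map (fun a b h => pvStr_inj h))
    simpa [pvStr] using h1
  have hom : ct.toList.foldl (fun (d : PySem.Dict String Int) letter =>
        let u := PySem.Str.upper (String.ofList [letter])
        if PySem.Str.isIn u pvLETTERS then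
          if !(d.contains u) then d.insert u 1 else d.insert u ((d.get? u).getD 0 + 1)
        else d)
      (pvLETTERS.toList.foldl
        (fun (d : PySem.Dict String Int) letter => d.insert (String.ofList [letter]) 0)
        PySem.Dict.empty)
      = pvDictOf (pvUp ct) pvLETTERS.toList := by
    rw [hom0, pvCount_phase ct.toList (fun _ => 0)]
    apply PySem.Dict.ext
    show List.map _ _ = List.map _ _
    apply List.map_congr_left
    intro c _
    simp [pvCnt, pvUp]
  have hA : freqDict ct = ((pvFreqLoop
      ((ct.toList.foldl (fun (d : PySem.Dict String Int) letter =>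
          let u := PySem.Str.upper (String.ofList [letter])
          if PySem.Str.isIn u pvLETTERS then
            if !(d.contains u) then d.insert u 1 else d.insert u ((d.get? u).getD 0 + 1)
          else d)
        (pvLETTERS.toList.foldl
          (fun (d : PySem.Dict String Int) letter => d.insert (String.ofList [letter]) 0)
          PySem.Dict.empty)).items.length)
      (ct.toList.foldl (fun (d : PySem.Dict String Int) letter =>
          let u := PySem.Str.upper (String.ofList [letter])
          if PySem.Str.isIn u pvLETTERS then
            if !(d.contains u) then d.insert u 1 else d.insert u ((d.get? u).getD 0 + 1)
          else d)
        (pvLETTERS.toList.foldl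
          (fun (d : PySem.Dict String Int) letter => d.insert (String.ofList [letter]) 0)
          PySem.Dict.empty))
      PySem.Dict.empty 0 ct).insert " " " ").items := rfl
  rw [hom] at hA
  have hlen : (pvDictOf (pvUp ct) pvLETTERS.toList).items.length = 26 := by
    show (pvLETTERS.toList.map _).length = 26
    rw [List.length_map]
    rfl
  rw [hlen] at hA
  have hmain : pvFreqLoop 26 (pvDictOf (pvUp ct) pvLETTERS.toList) PySem.Dict.empty 0 ct
      = (⟨PySem.Dict.empty.items ++
          ((PySem.List.sorted pvLETTERS.toList (pvKey (pvUp ct))).map pvStr).zip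
            ((pvETAION.toList.drop 0).map pvStr)⟩ : PySem.Dict String String) := by
    have h1 := pvFreqLoop_eq ct 26 pvLETTERS.toList PySem.Dict.empty 0
      (List.Sublist.refl _) (by decide) (by decide)
      (fun c _ => PySem.Dict.contains_empty _)
    rw [Nat.cast_zero] at h1
    exact h1
  have hempty : (PySem.Dict.empty : PySem.Dict String String).items = [] := rfl
  rw [hmain, hempty, List.nil_append] at hA
  have hsp : (⟨((PySem.List.sorted pvLETTERS.toList (pvKey (pvUp ct))).map pvStr).zip
        ((pvETAION.toList.drop 0).map pvStr)⟩ : PySem.Dict String String).contains " " = false := by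
    rw [pvContains_false_iff, PySem.Dict.keys_mk]
    intro hmm
    have hzf : (((PySem.List.sorted pvLETTERS.toList (pvKey (pvUp ct))).map pvStr).zip
          ((pvETAION.toList.drop 0).map pvStr)).map Prod.fst
        = (PySem.List.sorted pvLETTERS.toList (pvKey (pvUp ct))).map pvStr := by
      apply List.map_fst_zip
      rw [List.length_map, List.length_map, (PySem.List.sorted_perm _ _ _).length_eq,
        List.drop_zero]
      decide
    rw [hzf] at hmm
    rcases List.mem_map.mp hmm with ⟨d, hd, hds⟩
    have hdL : d ∈ pvLETTERS.toList := (PySem.List.sorted_perm _ _ _).subset hd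
    have hdsp : d = ' ' := by
      have := congrArg String.toList hds
      simpa [pvStr] using this
    rw [hdsp] at hdL
    exact absurd hdL (by decide)
  rw [PySem.Dict.items_insert_of_not_contains _ _ hsp] at hA
  have hB : freqDict_alt ct
      = ((PySem.List.sorted2 pvLETTERS.toList
            (fun c => -(PySem.Str.count (PySem.Str.upper ct) (String.ofList [c]) : Int))
            (fun c => PySem.Str.find (PySem.Str.upper ct) (String.ofList [c]))).zip
          pvETAION.toList).map (fun p => (String.ofList [p.1], String.ofList [p.2]))
        ++ [(" ", " ")] := rfl
  have hk1 : (fun c => -(PySem.Str.count (PySem.Str.upper ct) (String.ofList [c]) : Int))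
      = (fun c => -(pvCnt (pvUp ct) c)) := by
    funext c
    rw [PySem.Str.count_eq]
    show -(PySem.Chars.count (PySem.Str.upper ct).toList (String.ofList [c]).toList : Int) = _
    rw [PySem.Str.toList_upper, String.toList_ofList, pvCount_single]
    rfl
  have hk2 : (fun c => PySem.Str.find (PySem.Str.upper ct) (String.ofList [c]))
      = (fun c => pvFnd (pvUp ct) c) := by
    funext c
    rw [PySem.Str.find_eq, PySem.Str.toList_upper, String.toList_ofList]
    rfl
  rw [hk1, hk2, pvSorted2_eq] at hB
  rw [hA, hB]
  have hz : ((PySem.List.sorted pvLETTERS.toList (pvKey (pvUp ct))).map pvStr).zip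
        ((pvETAION.toList.drop 0).map pvStr)
      = ((PySem.List.sorted pvLETTERS.toList (pvKey (pvUp ct))).zip pvETAION.toList).map
          (fun p => (String.ofList [p.1], String.ofList [p.2])) := by
    rw [List.drop_zero, List.zip_map]
    apply List.map_congr_left
    intro p _
    cases p
    rfl
  rw [hz]
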